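-- pv_equiv track=rewrite | github.com/Poissonismyson/python | Laboratori/Laboratorio_5/Es3/Es3.py | scambiarighe
-- ===== SOURCE A (Python) =====
-- def scambiarighe(m,i1,i2):
-- 	ret = []
-- 	if len(m) != 0 and validamatrice(m) and i2 < len(m) and i1 < len(m) and i2 > -1 and i1 > -1:
-- 		for i in range(len(m)):
-- 			riga = []
-- 			for j in range(len(m[0])):
-- 				if i == i1:
-- 					riga.append(m[i2][j])
-- 				elif i == i2:
-- 					riga.append(m[i1][j])
-- 				else:
-- 					riga.append(m[i][j])
-- 			ret.append(riga)
-- 		return ret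
-- 	else:
-- 		return m
--
-- def validamatrice(l):
-- 	lunghezza = len(l[0])
-- 	for i in range(1,len(l)):
-- 		if len(l[i]) != lunghezza:
-- 			return False
-- 	return True
-- ===== SOURCE B (Python) =====
-- def scambiarighe(m, i1, i2):
--     if len(m) != 0 and validamatrice(m) and i2 < len(m) and i1 < len(m) and i2 > -1 and i1 > -1:
--         ret = [list(r) for r in m]
--         ret[i1], ret[i2] = ret[i2], ret[i1]
--         return ret
--     return m
--
-- def validamatrice(l):
--     return all(len(r) == len(l[0]) for r in l)
-- ===== Notes on version B (the rewrite author's own statement) =====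
-- stated objective: simpler
-- what changed: A rebuilds every row element-by-element with a per-element if/elif remapping rows inside one fused nested loop; B makes a branch-free full copy and then swaps the two rows in one constant-time tuple assignment
import Mathlib
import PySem

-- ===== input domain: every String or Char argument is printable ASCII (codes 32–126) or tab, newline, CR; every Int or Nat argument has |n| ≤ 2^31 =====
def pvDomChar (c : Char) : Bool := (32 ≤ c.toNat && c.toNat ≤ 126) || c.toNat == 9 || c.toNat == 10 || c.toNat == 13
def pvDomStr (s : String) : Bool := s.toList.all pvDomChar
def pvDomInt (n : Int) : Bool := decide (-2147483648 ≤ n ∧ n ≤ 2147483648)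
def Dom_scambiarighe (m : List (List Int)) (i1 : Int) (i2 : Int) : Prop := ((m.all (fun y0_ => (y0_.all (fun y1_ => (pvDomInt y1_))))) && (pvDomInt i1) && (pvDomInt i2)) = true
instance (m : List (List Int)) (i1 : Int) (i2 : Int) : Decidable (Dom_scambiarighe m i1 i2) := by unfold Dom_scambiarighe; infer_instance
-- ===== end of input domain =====

-- B replaces A's fused nested loop (per-element if/elif row remapping) by a branch-free
-- full copy followed by a single whole-row swap; objective: simpler. Return value only
-- (neither program mutates its argument).

-- ===== PORT A =====
def validamatrice (l : List (List Int)) : Bool :=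
  let lunghezza := (PySem.List.pyGetD l 0 []).length
  (PySem.List.pyRange 1 (PySem.List.len l) 1).all
    (fun i => (PySem.List.pyGetD l i []).length == lunghezza)

def scambiarighe (m : List (List Int)) (i1 : Int) (i2 : Int) : List (List Int) :=
  if PySem.List.len m ≠ 0 ∧ validamatrice m = true ∧ i2 < PySem.List.len m ∧
      i1 < PySem.List.len m ∧ i2 > -1 ∧ i1 > -1 then
    (PySem.List.pyRange 0 (PySem.List.len m) 1).foldl (fun ret i =>
      ret ++ [(PySem.List.pyRange 0 (PySem.List.len (PySem.List.pyGetD m 0 [])) 1).foldl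
        (fun riga j =>
          riga ++ [if i = i1 then PySem.List.pyGetD (PySem.List.pyGetD m i2 []) j 0
                   else if i = i2 then PySem.List.pyGetD (PySem.List.pyGetD m i1 []) j 0
                   else PySem.List.pyGetD (PySem.List.pyGetD m i []) j 0]) []]) []
  else m

-- ===== PORT B =====
def validamatrice_alt (l : List (List Int)) : Bool :=
  l.all (fun r => r.length == (PySem.List.pyGetD l 0 []).length)

def scambiarighe_alt (m : List (List Int)) (i1 : Int) (i2 : Int) : List (List Int) :=
  if PySem.List.len m ≠ 0 ∧ validamatrice_alt m = true ∧ i2 < PySem.List.len m ∧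
      i1 < PySem.List.len m ∧ i2 > -1 ∧ i1 > -1 then
    let ret := m.map (fun r => r)
    PySem.List.pySetD (PySem.List.pySetD ret i1 (PySem.List.pyGetD ret i2 []))
      i2 (PySem.List.pyGetD ret i1 [])
  else m

-- ===== PRECONDITION & SPEC =====
def Spec_scambiarighe (m : List (List Int)) (i1 : Int) (i2 : Int) (out : List (List Int)) : Prop := out = scambiarighe_alt m i1 i2
instance (m : List (List Int)) (i1 : Int) (i2 : Int) (out : List (List Int)) : Decidable (Spec_scambiarighe m i1 i2 out) := by unfold Spec_scambiarighe; infer_instance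

-- ===== CLAIM (what is proved, stated in full; the proofs are below) =====
def Claim_equal_scambiarighe : Prop := ∀ (m : List (List Int)) (i1 : Int) (i2 : Int), Dom_scambiarighe m i1 i2 → Spec_scambiarighe m i1 i2 (scambiarighe m i1 i2)

-- ===== LEMMAS AND PROOFS =====

-- indexing with a cast natural index is plain getElem
theorem pyGetD_idx (m : List (List Int)) (k : Nat) (hk : k < m.length) :
    PySem.List.pyGetD m (k : Int) [] = m[k] := by
  simp [PySem.List.pyGetD_natCast, hk]

theorem valid_eq_aux (m : List (List Int)) (hm : m ≠ []) :
    ((PySem.List.pyRange 1 (PySem.List.len m) 1).all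
      (fun i => (PySem.List.pyGetD m i []).length == (PySem.List.pyGetD m 0 []).length))
    = m.all (fun r => r.length == (PySem.List.pyGetD m 0 []).length) := by
  obtain ⟨r0, rest, rfl⟩ := List.exists_cons_of_ne_nil hm
  have h1 : (PySem.List.pyRange 1 (PySem.List.len (r0 :: rest)) 1).map
      (fun i => PySem.List.pyGetD (r0 :: rest) i []) = rest := by
    simpa using PySem.List.map_pyGetD_pyRange (r0 :: rest) [] (a := 1) (by norm_num)
  conv_rhs => rw [List.all_cons, ← h1, List.all_map]
  simp [PySem.List.pyGetD_zero_cons]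
  rfl

-- the two validity checks agree on nonempty matrices (B also checks row 0 against itself, trivially true)
theorem valid_eq (m : List (List Int)) (hm : m ≠ []) :
    validamatrice m = validamatrice_alt m := by
  unfold validamatrice validamatrice_alt
  exact valid_eq_aux m hm

-- all rows of a valid matrix have the length of row 0
theorem valid_rows (m : List (List Int)) (h : validamatrice m = true)
    (k : Nat) (hk : k < m.length) :
    m[k].length = (PySem.List.pyGetD m 0 []).length := by
  unfold validamatrice at h
  rcases Nat.eq_zero_or_pos k with rfl | hpos
  · rw [show ((0:Int)) = ((0:Nat):Int) by norm_num, pyGetD_idx m 0 hk]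
  · have hmem : (k : Int) ∈ PySem.List.pyRange 1 (PySem.List.len m) 1 := by
      rw [PySem.List.mem_pyRange_one]; simp; omega
    have := List.all_eq_true.mp h _ hmem
    rw [pyGetD_idx m k hk] at this
    simpa using this

-- A's rebuilt row (column loop of width len(m[0])) is a copy of the source row
theorem row_copy (m : List (List Int)) (src : Nat) (hsrc : src < m.length)
    (hval : ∀ (k : Nat) (hk : k < m.length), m[k].length = (PySem.List.pyGetD m 0 []).length) :
    (PySem.List.pyRange 0 (PySem.List.len (PySem.List.pyGetD m 0 [])) 1).map
      (fun j => PySem.List.pyGetD m[src] j 0) = m[src] := by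
  have : PySem.List.len (PySem.List.pyGetD m 0 []) = PySem.List.len m[src] := by
    simp [PySem.List.len_eq, hval src hsrc]
  rw [this, PySem.List.map_pyGetD_pyRange_zero]

-- B's Python-index row swap is List.set at the two natural indices
theorem pySetD_eq_set (xs : List (List Int)) (n : Nat) (v : List Int) (h : n < xs.length) :
    PySem.List.pySetD xs (n : Int) v = xs.set n v := by
  simp [PySem.List.pySetD, PySem.List.pySet?, h, PySem.List.pyIdx?]

-- ===== VERDICT (by name: the statement is the Claim_ definition above) =====
theorem scambiarighe_spec : Claim_equal_scambiarighe := by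
  intro m i1 i2 _
  unfold Spec_scambiarighe scambiarighe scambiarighe_alt
  by_cases hm : m = []
  · subst hm; simp
  · rw [valid_eq m hm]
    by_cases hP : PySem.List.len m ≠ 0 ∧ validamatrice_alt m = true ∧
        i2 < PySem.List.len m ∧ i1 < PySem.List.len m ∧ i2 > -1 ∧ i1 > -1
    · rw [if_pos hP, if_pos hP]
      obtain ⟨-, hv, hi2, hi1, hi2n, hi1n⟩ := hP
      have hval : validamatrice m = true := by rw [valid_eq m hm]; exact hv
      have hrows := valid_rows m hval
      set n1 := i1.toNat with hn1def
      set n2 := i2.toNat with hn2def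
      have hc1 : i1 = (n1 : Int) := by omega
      have hc2 : i2 = (n2 : Int) := by omega
      have hn1 : n1 < m.length := by simp [PySem.List.len_eq] at hi1; omega
      have hn2 : n2 < m.length := by simp [PySem.List.len_eq] at hi2; omega
      -- B side: copy is the identity, pySetD is set
      have hmap : (m.map fun r => r) = m := by simp
      show _ = PySem.List.pySetD
          (PySem.List.pySetD (m.map fun r => r) i1 (PySem.List.pyGetD (m.map fun r => r) i2 []))
          i2 (PySem.List.pyGetD (m.map fun r => r) i1 [])
      rw [hmap, hc1, hc2, pyGetD_idx m n2 hn2, pyGetD_idx m n1 hn1,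
          pySetD_eq_set m n1 _ hn1, pySetD_eq_set _ n2 _ (by simpa using hn2)]
      -- A side: folds are maps, each rebuilt row is a row of m
      simp only [PySem.List.foldl_append_singleton_eq_map, List.nil_append]
      apply List.ext_getElem
      · simp [PySem.List.length_pyRange_one, PySem.List.len_eq]
      · intro k hk hk'
        have hkm : k < m.length := by
          simpa [PySem.List.length_pyRange_one, PySem.List.len_eq] using hk
        rw [List.getElem_map, PySem.List.getElem_pyRange_one, zero_add]
        have hrow : (PySem.List.pyRange 0 (PySem.List.len (PySem.List.pyGetD m 0 [])) 1).map
            (fun j => if (k : Int) = (n1 : Int) then PySem.List.pyGetD m[n2] j 0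
                      else if (k : Int) = (n2 : Int) then PySem.List.pyGetD m[n1] j 0
                      else PySem.List.pyGetD (PySem.List.pyGetD m (k : Int) []) j 0)
            = if k = n1 then m[n2] else if k = n2 then m[n1] else m[k] := by
          by_cases e1 : k = n1
          · have e1' : (k : Int) = (n1 : Int) := by exact_mod_cast e1
            simp only [e1', if_true, if_pos e1]
            exact row_copy m n2 hn2 hrows
          · have e1' : ¬ ((k : Int) = (n1 : Int)) := by exact_mod_cast e1
            simp only [e1', if_false, if_neg e1]
            by_cases e2 : k = n2
            · have e2' : (k : Int) = (n2 : Int) := by exact_mod_cast e2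
              simp only [e2', if_true, if_pos e2]
              exact row_copy m n1 hn1 hrows
            · have e2' : ¬ ((k : Int) = (n2 : Int)) := by exact_mod_cast e2
              simp only [e2', if_false, if_neg e2]
              rw [pyGetD_idx m k hkm]
              exact row_copy m k hkm hrows
        rw [hrow, List.getElem_set, List.getElem_set]
        by_cases e1 : k = n1
        · rw [if_pos e1]
          by_cases e12 : n2 = k
          · rw [if_pos e12]
            simp only [show n2 = n1 by omega]
          · rw [if_neg e12, if_pos (by omega : n1 = k)]
        · rw [if_neg e1]
          by_cases e2 : k = n2
          · rw [if_pos e2, if_pos (by omega : n2 = k)]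
          · rw [if_neg e2, if_neg (by omega : ¬ n2 = k), if_neg (by omega : ¬ n1 = k)]
    · rw [if_neg hP, if_neg hP]
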